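-- pv_equiv track=rewrite | github.com/SWDesertPenguin/DigitalSeance | scripts/check_detection_taxonomy_parity.py | diff_registries
-- ===== SOURCE A (Python) =====
-- def diff_registries(
--     py_classes: dict[str, str],
--     js_classes: dict[str, str],
-- ) -> list[str]:
--     """Return human-readable drift descriptions (empty = parity)."""
--     errors: list[str] = []
--     py_keys = set(py_classes)
--     js_keys = set(js_classes)
--     for key in sorted(py_keys - js_keys):
--         errors.append(
--             f"  backend has key {key!r} but frontend mirror does not",
--         )
--     for key in sorted(js_keys - py_keys):
--         errors.append(
--             f"  frontend has key {key!r} but backend registry does not",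
--         )
--     for key in sorted(py_keys & js_keys):
--         if py_classes[key] != js_classes[key]:
--             errors.append(
--                 f"  label drift on {key!r}: "
--                 f"backend={py_classes[key]!r} frontend={js_classes[key]!r}",
--             )
--     return errors
-- ===== SOURCE B (Python) =====
-- def diff_registries(
--     py_classes: dict[str, str],
--     js_classes: dict[str, str],
-- ) -> list[str]:
--     """Return human-readable drift descriptions (empty = parity)."""
--     backend_only: list[str] = []
--     frontend_only: list[str] = []
--     drift: list[str] = []
--     for key in sorted(set(py_classes) | set(js_classes)):
--         if key not in js_classes:
--             backend_only.append(
--                 f"  backend has key {key!r} but frontend mirror does not",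
--             )
--         elif key not in py_classes:
--             frontend_only.append(
--                 f"  frontend has key {key!r} but backend registry does not",
--             )
--         elif py_classes[key] != js_classes[key]:
--             drift.append(
--                 f"  label drift on {key!r}: "
--                 f"backend={py_classes[key]!r} frontend={js_classes[key]!r}",
--             )
--     return backend_only + frontend_only + drift
-- ===== Notes on version B (the rewrite author's own statement) =====
-- stated objective: alternative
-- what changed: A walks three separately sorted set computations (py-js, js-py, intersection); B sorts the union of keys once and classifies each key in a single pass into three buckets (backend-only, frontend-only, label drift), returning their concatenation.
import Mathlib
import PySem

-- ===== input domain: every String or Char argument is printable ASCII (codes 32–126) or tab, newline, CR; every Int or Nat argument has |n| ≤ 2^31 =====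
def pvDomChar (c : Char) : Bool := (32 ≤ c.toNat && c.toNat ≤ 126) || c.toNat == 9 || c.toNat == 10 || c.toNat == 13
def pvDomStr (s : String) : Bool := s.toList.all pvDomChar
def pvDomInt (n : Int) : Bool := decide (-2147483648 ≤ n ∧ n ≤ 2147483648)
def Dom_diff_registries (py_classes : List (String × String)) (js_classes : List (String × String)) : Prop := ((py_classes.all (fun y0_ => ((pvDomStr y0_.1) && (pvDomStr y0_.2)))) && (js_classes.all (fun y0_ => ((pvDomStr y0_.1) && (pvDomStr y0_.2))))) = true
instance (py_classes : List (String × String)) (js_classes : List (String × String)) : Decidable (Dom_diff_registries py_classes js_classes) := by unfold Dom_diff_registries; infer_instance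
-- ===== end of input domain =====

-- B replaces A's three sorted set-difference/intersection loops by one sorted union and a single
-- classifying pass into three buckets (objective: alternative decomposition, same asymptotic cost).

-- ===== PORT A =====
-- shared helper: Python's repr(s) for str, exact on the printable-ASCII + tab/newline/CR domain
def pyReprEsc (q : Char) (c : Char) : List Char :=
  if c = '\\' then ['\\', '\\']
  else if c = q then ['\\', q]
  else if c = '\t' then ['\\', 't']
  else if c = '\n' then ['\\', 'n']
  else if c = '\r' then ['\\', 'r']
  else [c]

def pyRepr (s : String) : String :=
  let cs := s.toList
  let q : Char := if cs.contains '\'' && !(cs.contains '"') then '"' else '\''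
  String.mk (q :: cs.flatMap (pyReprEsc q) ++ [q])

-- shared helper: dict lookup d[k] (first match per the association-list convention; the
-- default is unreachable: both programs only look up keys present in both dicts)
def dGetD (d : List (String × String)) (k : String) : String :=
  ((d.find? (fun p => p.1 == k)).map Prod.snd).getD ""

def msgBackend (k : String) : String :=
  "  backend has key " ++ pyRepr k ++ " but frontend mirror does not"
def msgFrontend (k : String) : String :=
  "  frontend has key " ++ pyRepr k ++ " but backend registry does not"
def msgDrift (k pv jv : String) : String :=
  "  label drift on " ++ pyRepr k ++ ": backend=" ++ pyRepr pv ++ " frontend=" ++ pyRepr jv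

def diff_registries (py_classes : List (String × String)) (js_classes : List (String × String)) : List String :=
  let py_keys : PySem.Set String := PySem.Set.ofList (py_classes.map Prod.fst)
  let js_keys : PySem.Set String := PySem.Set.ofList (js_classes.map Prod.fst)
  let errors : List String :=
    (PySem.List.sorted (PySem.Set.diff py_keys js_keys) (fun k => k) false).foldl
      (fun acc k => acc ++ [msgBackend k]) []
  let errors :=
    (PySem.List.sorted (PySem.Set.diff js_keys py_keys) (fun k => k) false).foldl
      (fun acc k => acc ++ [msgFrontend k]) errors
  let errors :=
    (PySem.List.sorted (PySem.Set.inter py_keys js_keys) (fun k => k) false).foldl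
      (fun acc k =>
        if dGetD py_classes k != dGetD js_classes k then
          acc ++ [msgDrift k (dGetD py_classes k) (dGetD js_classes k)]
        else acc) errors
  errors

-- ===== PORT B =====
def diff_registries_alt (py_classes : List (String × String)) (js_classes : List (String × String)) : List String :=
  let keys : List String :=
    PySem.List.sorted
      (PySem.Set.union (PySem.Set.ofList (py_classes.map Prod.fst))
        (PySem.Set.ofList (js_classes.map Prod.fst)))
      (fun k => k) false
  let s :=
    keys.foldl
      (fun (s : List String × List String × List String) k =>
        if !((js_classes.map Prod.fst).contains k) then
          (s.1 ++ [msgBackend k], s.2.1, s.2.2)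
        else if !((py_classes.map Prod.fst).contains k) then
          (s.1, s.2.1 ++ [msgFrontend k], s.2.2)
        else if dGetD py_classes k != dGetD js_classes k then
          (s.1, s.2.1, s.2.2 ++ [msgDrift k (dGetD py_classes k) (dGetD js_classes k)])
        else s)
      ([], [], [])
  s.1 ++ s.2.1 ++ s.2.2

-- ===== PRECONDITION & SPEC =====
def Spec_diff_registries (py_classes : List (String × String)) (js_classes : List (String × String)) (out : List String) : Prop := out = diff_registries_alt py_classes js_classes
instance (py_classes : List (String × String)) (js_classes : List (String × String)) (out : List String) : Decidable (Spec_diff_registries py_classes js_classes out) := by unfold Spec_diff_registries; infer_instance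

-- ===== CLAIM (what is proved, stated in full; the proofs are below) =====
def Claim_equal_diff_registries : Prop := ∀ (py_classes : List (String × String)) (js_classes : List (String × String)), Dom_diff_registries py_classes js_classes → Spec_diff_registries py_classes js_classes (diff_registries py_classes js_classes)

-- ===== LEMMAS AND PROOFS =====

-- B's single classifying fold is the three filtered buckets.
theorem tri_foldl (py js : List (String × String)) (keys : List String)
    (b f d : List String) :
    keys.foldl
      (fun (s : List String × List String × List String) k =>
        if !((js.map Prod.fst).contains k) then
          (s.1 ++ [msgBackend k], s.2.1, s.2.2)
        else if !((py.map Prod.fst).contains k) then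
          (s.1, s.2.1 ++ [msgFrontend k], s.2.2)
        else if dGetD py k != dGetD js k then
          (s.1, s.2.1, s.2.2 ++ [msgDrift k (dGetD py k) (dGetD js k)])
        else s)
      (b, f, d)
    = (b ++ ((keys.filter (fun k => !((js.map Prod.fst).contains k))).map msgBackend),
       f ++ ((keys.filter (fun k => (js.map Prod.fst).contains k && !((py.map Prod.fst).contains k))).map msgFrontend),
       d ++ ((keys.filter (fun k => (js.map Prod.fst).contains k && (py.map Prod.fst).contains k
                && (dGetD py k != dGetD js k))).map
              (fun k => msgDrift k (dGetD py k) (dGetD js k)))) := by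
  induction keys generalizing b f d with
  | nil => simp
  | cons k t ih =>
    by_cases h1 : ((js.map Prod.fst).contains k) = true
    · by_cases h2 : ((py.map Prod.fst).contains k) = true
      · by_cases h3 : (dGetD py k != dGetD js k) = true
        · simp only [List.foldl_cons, List.filter_cons, List.map_cons, h1, h2, h3, Bool.not_true,
            Bool.false_eq_true, Bool.true_and, Bool.and_true, if_true, if_false,
            ite_true, ite_false, ih, List.append_assoc, List.singleton_append]
        · rw [Bool.not_eq_true] at h3
          simp only [List.foldl_cons, List.filter_cons, List.map_cons, h1, h2, h3, Bool.not_true,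
            Bool.false_eq_true, Bool.true_and, Bool.and_false, if_true, if_false,
            ite_true, ite_false, ih]
      · rw [Bool.not_eq_true] at h2
        simp only [List.foldl_cons, List.filter_cons, List.map_cons, h1, h2, Bool.not_true, Bool.not_false,
          Bool.false_eq_true, Bool.true_and, Bool.and_false, Bool.and_true, Bool.false_and,
          if_true, if_false, ite_true, ite_false, ih, List.append_assoc, List.singleton_append]
    · rw [Bool.not_eq_true] at h1
      simp only [List.foldl_cons, List.filter_cons, List.map_cons, h1, Bool.not_false, Bool.false_and,
        Bool.false_eq_true, if_true, if_false, ite_true, ite_false, ih,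
        List.append_assoc, List.singleton_append]

-- filtering two stable id-sorts of duplicate-free lists with matching membership gives the same list
theorem filter_sorted_eq (xs ys : List String) (q r : String → Bool)
    (hx : xs.Nodup) (hy : ys.Nodup)
    (hmem : ∀ k, (k ∈ ys ∧ r k = true) ↔ (k ∈ xs ∧ q k = true)) :
    (PySem.List.sorted xs (fun k => k) false).filter q
      = (PySem.List.sorted ys (fun k => k) false).filter r := by
  apply PySem.List.eq_of_perm_of_pairwise_le_of_injective (fun k : String => k) (fun _ _ h => h)
  · have h1 : (List.filter q (PySem.List.sorted xs (fun k => k) false)).Perm (xs.filter q) :=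
      (PySem.List.sorted_perm xs (fun k => k) false).filter q
    have h2 : (List.filter r (PySem.List.sorted ys (fun k => k) false)).Perm (ys.filter r) :=
      (PySem.List.sorted_perm ys (fun k => k) false).filter r
    have h3 : (xs.filter q).Perm (ys.filter r) := by
      rw [List.perm_ext_iff_of_nodup (hx.filter q) (hy.filter r)]
      intro k
      simp only [List.mem_filter]
      exact (hmem k).symm
    exact (h1.trans h3).trans h2.symm
  · exact (PySem.List.sorted_pairwise xs fun k => k).filter q
  · exact (PySem.List.sorted_pairwise ys fun k => k).filter r

-- ===== VERDICT (by name: the statement is the Claim_ definition above) =====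
theorem diff_registries_spec : Claim_equal_diff_registries := by
  intro py js _
  unfold Spec_diff_registries diff_registries diff_registries_alt
  dsimp only
  rw [tri_foldl]
  rw [PySem.List.foldl_append_singleton_eq_map, PySem.List.foldl_append_singleton_eq_map,
      PySem.List.foldl_append_if]
  simp only [List.nil_append, List.append_assoc]
  set pyS := PySem.Set.ofList (py.map Prod.fst) with hpyS
  set jsS := PySem.Set.ofList (js.map Prod.fst) with hjsS
  have hpy : pyS.Nodup := PySem.Set.nodup_ofList _
  have hjs : jsS.Nodup := PySem.Set.nodup_ofList _
  have hU : (PySem.Set.union pyS jsS).Nodup := PySem.Set.nodup_union _ _ hpy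
  have hmempy : ∀ k : String, (py.map Prod.fst).contains k = true ↔ k ∈ pyS := by
    intro k; rw [hpyS, PySem.Set.mem_ofList]; simp
  have hmemjs : ∀ k : String, (js.map Prod.fst).contains k = true ↔ k ∈ jsS := by
    intro k; rw [hjsS, PySem.Set.mem_ofList]; simp
  have e1 : (PySem.List.sorted (PySem.Set.union pyS jsS) (fun k => k) false).filter
        (fun k => !((js.map Prod.fst).contains k))
      = PySem.List.sorted (PySem.Set.diff pyS jsS) (fun k => k) false := by
    rw [← List.filter_true (PySem.List.sorted (PySem.Set.diff pyS jsS) (fun k => k) false)]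
    apply filter_sorted_eq _ _ _ _ hU (PySem.Set.nodup_diff _ _ hpy)
    intro k
    simp only [PySem.Set.mem_union, PySem.Set.mem_diff, Bool.not_eq_true',
      ← Bool.not_eq_true, hmemjs]
    tauto
  have e2 : (PySem.List.sorted (PySem.Set.union pyS jsS) (fun k => k) false).filter
        (fun k => (js.map Prod.fst).contains k && !((py.map Prod.fst).contains k))
      = PySem.List.sorted (PySem.Set.diff jsS pyS) (fun k => k) false := by
    rw [← List.filter_true (PySem.List.sorted (PySem.Set.diff jsS pyS) (fun k => k) false)]
    apply filter_sorted_eq _ _ _ _ hU (PySem.Set.nodup_diff _ _ hjs)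
    intro k
    simp only [PySem.Set.mem_union, PySem.Set.mem_diff, Bool.and_eq_true,
      Bool.not_eq_true', ← Bool.not_eq_true, hmemjs, hmempy]
    tauto
  have e3 : (PySem.List.sorted (PySem.Set.union pyS jsS) (fun k => k) false).filter
        (fun k => (js.map Prod.fst).contains k && (py.map Prod.fst).contains k
          && (dGetD py k != dGetD js k))
      = (PySem.List.sorted (PySem.Set.inter pyS jsS) (fun k => k) false).filter
        (fun k => dGetD py k != dGetD js k) := by
    apply filter_sorted_eq _ _ _ _ hU (PySem.Set.nodup_inter _ _ hpy)
    intro k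
    simp only [PySem.Set.mem_union, PySem.Set.mem_inter, Bool.and_eq_true, hmemjs, hmempy]
    tauto
  rw [e1, e2, e3]
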